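-- pv_equiv track=rewrite | github.com/Rajyadavpro/OCR | test/test1.py | GetFirstPageFromIdentifiers
-- ===== SOURCE A (Python) =====
-- from typing import List, Tuple, Dict
--
-- def NormalizeText(text: str) -> str:
--     return text.strip().lower()
--
-- def IsPageDemarcated(Page: int, DemarcatedRanges: List[Tuple[int, int]]) -> bool:
--     for start, end in DemarcatedRanges:
--         if start <= Page <= end:
--             return True
--     return False
--
-- def GetFirstPageFromIdentifiers(Pages: List[str], StartingIdentifier: str,
--                                 StartingIdentifierPlus1: str, Occurence: int,
--                                 StartingMinusN: int, DemarcatedRanges: List[Tuple[int, int]],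
--                                 TotalPages: int) -> int:
--     PageFound = -1
--     OccurrenceCount = 0
--
--     for i, page in enumerate(Pages):
--         if IsPageDemarcated(i + 1, DemarcatedRanges):
--             continue
--
--         norm_text = NormalizeText(page)
--         if NormalizeText(StartingIdentifier) in norm_text:
--             OccurrenceCount += 1
--             if OccurrenceCount == Occurence:
--                 PageFound = i + 1 - StartingMinusN
--                 break
--
--     if PageFound == -1 and StartingIdentifierPlus1:
--         for i, page in enumerate(Pages):
--             if IsPageDemarcated(i + 1, DemarcatedRanges):
--                 continue
--             if NormalizeText(StartingIdentifierPlus1) in NormalizeText(page):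
--                 PageFound = i + 1 - StartingMinusN
--                 break
--
--     return max(1, PageFound)
-- ===== SOURCE B (Python) =====
-- from typing import List, Tuple
--
--
-- def NormalizeText(text: str) -> str:
--     return text.strip().lower()
--
--
-- def GetFirstPageFromIdentifiers(Pages: List[str], StartingIdentifier: str,
--                                 StartingIdentifierPlus1: str, Occurence: int,
--                                 StartingMinusN: int, DemarcatedRanges: List[Tuple[int, int]],
--                                 TotalPages: int) -> int:
--     # Single pass: track both the Occurence-th id1 match and the first id2 match.
--     norm1 = NormalizeText(StartingIdentifier)
--     norm2 = NormalizeText(StartingIdentifierPlus1)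
--     want2 = bool(StartingIdentifierPlus1)
--     count = 0
--     page1 = None  # page number of the Occurence-th id1 match
--     page2 = None  # page number of the first id2 match
--     for i, page in enumerate(Pages):
--         if any(start <= i + 1 <= end for start, end in DemarcatedRanges):
--             continue
--         text = NormalizeText(page)
--         if page1 is None and norm1 in text:
--             count += 1
--             if count == Occurence:
--                 page1 = i + 1
--         if want2 and page2 is None and norm2 in text:
--             page2 = i + 1
--     found = page1 - StartingMinusN if page1 is not None else -1
--     if found == -1 and want2:
--         found = page2 - StartingMinusN if page2 is not None else -1
--     return max(1, found)
-- ===== Notes on version B (the rewrite author's own statement) =====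
-- stated objective: faster
-- what changed: Replaces A's two sequential scans (id1 pass with break, then a full id2 fallback pass) by one pass that maintains both candidate pages and an occurrence counter, with the normalized identifiers hoisted out of the loop; the result is selected after the loop.
import Mathlib
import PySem

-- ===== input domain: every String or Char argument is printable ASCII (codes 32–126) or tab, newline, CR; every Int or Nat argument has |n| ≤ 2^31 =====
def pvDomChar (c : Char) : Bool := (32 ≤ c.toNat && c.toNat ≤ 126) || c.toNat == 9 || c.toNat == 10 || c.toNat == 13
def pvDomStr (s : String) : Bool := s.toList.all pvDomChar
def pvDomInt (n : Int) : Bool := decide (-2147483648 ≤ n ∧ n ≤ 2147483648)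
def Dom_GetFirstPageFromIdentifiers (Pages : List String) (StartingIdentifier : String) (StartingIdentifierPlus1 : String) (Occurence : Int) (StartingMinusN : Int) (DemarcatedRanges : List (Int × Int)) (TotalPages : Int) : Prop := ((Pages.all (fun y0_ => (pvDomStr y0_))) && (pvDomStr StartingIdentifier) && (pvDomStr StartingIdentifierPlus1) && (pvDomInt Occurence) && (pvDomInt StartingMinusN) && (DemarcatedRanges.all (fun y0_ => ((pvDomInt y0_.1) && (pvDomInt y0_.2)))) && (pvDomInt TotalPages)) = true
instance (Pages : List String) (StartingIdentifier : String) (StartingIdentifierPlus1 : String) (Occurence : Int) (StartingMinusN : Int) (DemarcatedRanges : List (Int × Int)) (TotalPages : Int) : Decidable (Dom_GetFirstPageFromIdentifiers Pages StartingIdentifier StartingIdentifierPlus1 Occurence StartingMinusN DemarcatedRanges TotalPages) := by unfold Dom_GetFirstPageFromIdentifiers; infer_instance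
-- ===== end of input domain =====

-- B replaces A's two sequential scans by a single pass tracking both candidate pages, with the
-- normalized identifiers hoisted out of the loop (measured faster in a timing run).

-- ===== PORT A =====
-- NormalizeText: text.strip().lower()
def pvNorm (text : String) : String := PySem.Str.lower (PySem.Str.strip text)

-- IsPageDemarcated: loop with early return True
def pvIsDem (Page : Int) : List (Int × Int) → Bool
  | [] => false
  | (s, e) :: rest => if s ≤ Page ∧ Page ≤ e then true else pvIsDem Page rest

-- first for-loop of A (break returns i + 1 - StartingMinusN; falls off the list with -1)
def pvLoopA1 (sid : String) (occ smn : Int) (dr : List (Int × Int)) :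
    List String → Int → Int → Int
  | [], _, _ => -1
  | page :: rest, i, cnt =>
    if pvIsDem (i + 1) dr then pvLoopA1 sid occ smn dr rest (i + 1) cnt
    else
      let normText := pvNorm page
      if PySem.Str.isIn (pvNorm sid) normText then
        if cnt + 1 = occ then i + 1 - smn
        else pvLoopA1 sid occ smn dr rest (i + 1) (cnt + 1)
      else pvLoopA1 sid occ smn dr rest (i + 1) cnt

-- second for-loop of A (fallback scan for StartingIdentifierPlus1)
def pvLoopA2 (sid2 : String) (smn : Int) (dr : List (Int × Int)) :
    List String → Int → Int
  | [], _ => -1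
  | page :: rest, i =>
    if pvIsDem (i + 1) dr then pvLoopA2 sid2 smn dr rest (i + 1)
    else if PySem.Str.isIn (pvNorm sid2) (pvNorm page) then i + 1 - smn
    else pvLoopA2 sid2 smn dr rest (i + 1)

def GetFirstPageFromIdentifiers (Pages : List String) (StartingIdentifier : String) (StartingIdentifierPlus1 : String) (Occurence : Int) (StartingMinusN : Int) (DemarcatedRanges : List (Int × Int)) (TotalPages : Int) : Int :=
  let PageFound := pvLoopA1 StartingIdentifier Occurence StartingMinusN DemarcatedRanges Pages 0 0
  let PageFound :=
    if PageFound = -1 ∧ StartingIdentifierPlus1 ≠ "" then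
      pvLoopA2 StartingIdentifierPlus1 StartingMinusN DemarcatedRanges Pages 0
    else PageFound
  max 1 PageFound

-- ===== PORT B =====
-- single pass of B: carries the occurrence counter and both candidate pages
def pvLoopB (n1 n2 : String) (want2 : Bool) (occ : Int) (dr : List (Int × Int)) :
    List String → Int → Int → Option Int → Option Int → Option Int × Option Int
  | [], _, _, p1, p2 => (p1, p2)
  | page :: rest, i, cnt, p1, p2 =>
    if dr.any (fun se => decide (se.1 ≤ i + 1 ∧ i + 1 ≤ se.2)) then
      pvLoopB n1 n2 want2 occ dr rest (i + 1) cnt p1 p2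
    else
      let text := pvNorm page
      let step1 : Option Int × Int :=
        match p1 with
        | none =>
          if PySem.Str.isIn n1 text then
            if cnt + 1 = occ then (some (i + 1), cnt + 1) else (none, cnt + 1)
          else (none, cnt)
        | some q => (some q, cnt)
      let p2' := if want2 ∧ p2 = none ∧ PySem.Str.isIn n2 text then some (i + 1) else p2
      pvLoopB n1 n2 want2 occ dr rest (i + 1) step1.2 step1.1 p2'

def GetFirstPageFromIdentifiers_alt (Pages : List String) (StartingIdentifier : String) (StartingIdentifierPlus1 : String) (Occurence : Int) (StartingMinusN : Int) (DemarcatedRanges : List (Int × Int)) (TotalPages : Int) : Int :=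
  let n1 := pvNorm StartingIdentifier
  let n2 := pvNorm StartingIdentifierPlus1
  let want2 : Bool := StartingIdentifierPlus1 != ""
  let r := pvLoopB n1 n2 want2 Occurence DemarcatedRanges Pages 0 0 none none
  let found := match r.1 with | some q => q - StartingMinusN | none => -1
  let found :=
    if found = -1 ∧ want2 = true then
      match r.2 with | some q => q - StartingMinusN | none => -1
    else found
  max 1 found

-- ===== PRECONDITION & SPEC =====
def Spec_GetFirstPageFromIdentifiers (Pages : List String) (StartingIdentifier : String) (StartingIdentifierPlus1 : String) (Occurence : Int) (StartingMinusN : Int) (DemarcatedRanges : List (Int × Int)) (TotalPages : Int) (out : Int) : Prop := out = GetFirstPageFromIdentifiers_alt Pages StartingIdentifier StartingIdentifierPlus1 Occurence StartingMinusN DemarcatedRanges TotalPages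
instance (Pages : List String) (StartingIdentifier : String) (StartingIdentifierPlus1 : String) (Occurence : Int) (StartingMinusN : Int) (DemarcatedRanges : List (Int × Int)) (TotalPages : Int) (out : Int) : Decidable (Spec_GetFirstPageFromIdentifiers Pages StartingIdentifier StartingIdentifierPlus1 Occurence StartingMinusN DemarcatedRanges TotalPages out) := by unfold Spec_GetFirstPageFromIdentifiers; infer_instance

-- ===== CLAIM (what is proved, stated in full; the proofs are below) =====
def Claim_equal_GetFirstPageFromIdentifiers : Prop := ∀ (Pages : List String) (StartingIdentifier : String) (StartingIdentifierPlus1 : String) (Occurence : Int) (StartingMinusN : Int) (DemarcatedRanges : List (Int × Int)) (TotalPages : Int), Dom_GetFirstPageFromIdentifiers Pages StartingIdentifier StartingIdentifierPlus1 Occurence StartingMinusN DemarcatedRanges TotalPages → Spec_GetFirstPageFromIdentifiers Pages StartingIdentifier StartingIdentifierPlus1 Occurence StartingMinusN DemarcatedRanges TotalPages (GetFirstPageFromIdentifiers Pages StartingIdentifier StartingIdentifierPlus1 Occurence StartingMinusN DemarcatedRanges TotalPages)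

-- ===== LEMMAS AND PROOFS =====

-- A's demarcation helper equals B's any-test
theorem pvIsDem_eq_any (Page : Int) (dr : List (Int × Int)) :
    pvIsDem Page dr = dr.any (fun se => decide (se.1 ≤ Page ∧ Page ≤ se.2)) := by
  induction dr with
  | nil => rfl
  | cons hd tl ih =>
    obtain ⟨s, e⟩ := hd
    simp only [pvIsDem, List.any_cons, ih]
    by_cases h : s ≤ Page ∧ Page ≤ e <;> simp [h]

-- once the first candidate is fixed, the loop never changes it
theorem pvLoopB_fst_some (n1 n2 : String) (w : Bool) (occ : Int) (dr : List (Int × Int)) :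
    ∀ (pages : List String) (i cnt q : Int) (p2 : Option Int),
      (pvLoopB n1 n2 w occ dr pages i cnt (some q) p2).1 = some q := by
  intro pages
  induction pages with
  | nil => intro i cnt q p2; rfl
  | cons page rest ih =>
    intro i cnt q p2
    simp only [pvLoopB]
    split
    · exact ih (i + 1) cnt q p2
    · exact ih (i + 1) cnt q _

-- once the second candidate is fixed, the loop never changes it
theorem pvLoopB_snd_some (n1 n2 : String) (w : Bool) (occ : Int) (dr : List (Int × Int)) :
    ∀ (pages : List String) (i cnt q : Int) (p1 : Option Int),
      (pvLoopB n1 n2 w occ dr pages i cnt p1 (some q)).2 = some q := by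
  intro pages
  induction pages with
  | nil => intro i cnt q p1; rfl
  | cons page rest ih =>
    intro i cnt q p1
    simp only [pvLoopB]
    split
    · exact ih (i + 1) cnt q p1
    ·
      have : (if w ∧ (some q : Option Int) = none ∧ PySem.Str.isIn n2 (pvNorm page) then some (i + 1) else some q) = some q := by
        simp
      rw [this]
      exact ih (i + 1) _ q _
  
-- A's first loop computes the first component of B's pass
theorem pvLoopA1_eq (sid n2 : String) (w : Bool) (occ smn : Int) (dr : List (Int × Int)) :
    ∀ (pages : List String) (i cnt : Int) (p2 : Option Int),
      pvLoopA1 sid occ smn dr pages i cnt =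
        (match (pvLoopB (pvNorm sid) n2 w occ dr pages i cnt none p2).1 with
         | some q => q - smn
         | none => -1) := by
  intro pages
  induction pages with
  | nil => intro i cnt p2; rfl
  | cons page rest ih =>
    intro i cnt p2
    simp only [pvLoopA1, pvLoopB, pvIsDem_eq_any]
    split
    · exact ih (i + 1) cnt p2
    ·
      by_cases hm : PySem.Str.isIn (pvNorm sid) (pvNorm page)
      · simp only [hm, if_pos trivial]
        by_cases hc : cnt + 1 = occ
        · simp only [hc, if_pos trivial]
          rw [pvLoopB_fst_some]
        · simp only [hc, if_false]
          exact ih (i + 1) (cnt + 1) _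
      · simp only [hm]
        exact ih (i + 1) cnt _

-- A's fallback loop computes the second component of B's pass (when the fallback id is wanted)
theorem pvLoopA2_eq (sid2 n1 : String) (occ smn : Int) (dr : List (Int × Int)) :
    ∀ (pages : List String) (i cnt : Int) (p1 : Option Int),
      pvLoopA2 sid2 smn dr pages i =
        (match (pvLoopB n1 (pvNorm sid2) true occ dr pages i cnt p1 none).2 with
         | some q => q - smn
         | none => -1) := by
  intro pages
  induction pages with
  | nil => intro i cnt p1; rfl
  | cons page rest ih =>
    intro i cnt p1
    simp only [pvLoopA2, pvLoopB, pvIsDem_eq_any]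
    split
    · exact ih (i + 1) cnt p1
    ·
      by_cases hm : PySem.Str.isIn (pvNorm sid2) (pvNorm page) = true
      · rw [if_pos hm]
        simp only [hm, and_self, if_true, pvLoopB_snd_some]
      · rw [if_neg hm]
        simp only [hm, false_and, true_and]
        exact ih (i + 1) _ _

-- ===== VERDICT (by name: the statement is the Claim_ definition above) =====
theorem GetFirstPageFromIdentifiers_spec : Claim_equal_GetFirstPageFromIdentifiers := by
  intro Pages sid sid2 occ smn dr tp _
  unfold Spec_GetFirstPageFromIdentifiers GetFirstPageFromIdentifiers GetFirstPageFromIdentifiers_alt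
  dsimp only
  by_cases h2 : sid2 = ""
  · have hw : (sid2 != "") = false := by simp [h2]
    rw [hw, pvLoopA1_eq sid (pvNorm sid2) false occ smn dr Pages 0 0 none]
    rw [if_neg (fun h => h.2 h2), if_neg (fun h => Bool.false_ne_true h.2)]
  · have hw : (sid2 != "") = true := by simp [h2]
    rw [hw, pvLoopA1_eq sid (pvNorm sid2) true occ smn dr Pages 0 0 none]
    by_cases hf : (match (pvLoopB (pvNorm sid) (pvNorm sid2) true occ dr Pages 0 0 none none).1 with
                   | some q => q - smn
                   | none => (-1 : Int)) = -1
    · rw [if_pos ⟨hf, h2⟩, if_pos ⟨hf, rfl⟩]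
      rw [pvLoopA2_eq sid2 (pvNorm sid) occ smn dr Pages 0 0 none]
    · rw [if_neg (fun h => hf h.1), if_neg (fun h => hf h.1)]
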